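-- pv_equiv track=rewrite | github.com/SOYNGPARK/cosmos | programmers_week4.py | solution
-- ===== SOURCE A (Python) =====
-- def solution(stock, dates, supplies, k):
--     answer = 0
--
--     import heapq
--
--     # 1
--     dates.reverse()
--     supplies.reverse()
--
--     h = list()
--
--     while stock < k : # 2
--         while dates[-1] <= stock and len(dates) > 0 : # 3
--             dates.pop()
--             s = supplies.pop()
--             heapq.heappush(h, (-s, s)) # 4
--
--         # 5
--         stock += heapq.heappop(h)[1]
--         answer += 1
--
--     return answer
-- ===== SOURCE B (Python) =====
-- def solution(stock, dates, supplies, k):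
--     # One flat loop over an index into dates (inputs are not mutated) with a plain
--     # list `pool` of currently-available supplies; a refill removes the maximum
--     # of the pool.  No heap, no list reversal, no destructive popping.
--     pool = []
--     answer = 0
--     i = 0
--     n = len(dates)
--     while stock < k:
--         if i < n and dates[i] <= stock:
--             pool.append(supplies[i])
--             i += 1
--         else:
--             j = pool.index(max(pool))
--             stock += pool.pop(j)
--             answer += 1
--     return answer
-- ===== Notes on version B (the rewrite author's own statement) =====
-- stated objective: simpler
-- what changed: Replaces A's max-heap of (-s,s) pairs and two nested while-loops over in-place reversed, destructively popped lists with one flat loop over an index into dates and a plain list pool whose maximum is removed per refill; B does not mutate its arguments.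
import Mathlib
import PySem

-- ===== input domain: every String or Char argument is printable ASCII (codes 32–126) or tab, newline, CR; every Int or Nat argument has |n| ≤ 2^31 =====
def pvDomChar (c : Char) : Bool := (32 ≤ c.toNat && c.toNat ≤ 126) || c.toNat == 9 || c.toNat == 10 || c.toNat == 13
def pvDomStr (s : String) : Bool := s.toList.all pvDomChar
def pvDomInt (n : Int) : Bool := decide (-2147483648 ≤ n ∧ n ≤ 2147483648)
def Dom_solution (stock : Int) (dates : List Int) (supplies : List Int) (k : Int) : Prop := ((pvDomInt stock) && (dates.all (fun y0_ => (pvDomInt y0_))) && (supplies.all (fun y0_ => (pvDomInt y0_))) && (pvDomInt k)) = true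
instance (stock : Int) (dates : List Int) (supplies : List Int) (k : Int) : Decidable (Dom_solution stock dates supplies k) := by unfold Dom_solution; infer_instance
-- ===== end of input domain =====

-- B replaces A's max-heap of (-s,s) pairs and two nested destructive while-loops with one
-- flat loop over an index and a plain list pool (max removed per refill); A mutates
-- dates/supplies in place (reverse + pop), B does not — the equivalence proved here is
-- about the return value only.

-- ===== PORT A =====
-- heapq stores the pairs (-s, s); heappop returns a minimal pair, i.e. its second component
-- is a maximal supply, and all maximal pairs are the identical tuple.  The heap is therefore
-- modelled by the list of stored supplies: push = cons, pop = remove one maximum.  This is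
-- exact for every value the Python heap operations return.
def heapPopA (h : List Int) : Option (Int × List Int) :=
  match h with
  | [] => none                                   -- heappop([]) raises IndexError
  | x :: t => some (t.foldl max x, (x :: t).erase (t.foldl max x))

-- inner `while dates[-1] <= stock and len(dates) > 0:` — dates[-1] is evaluated first, so an
-- exhausted dates list raises IndexError (none).  fuel = dates.length + 1 always suffices
-- (each pass removes one date); fuel 0 is unreachable.
def absorbA (fuel : Nat) (d s h : List Int) (stock : Int) :
    Option (List Int × List Int × List Int) :=
  match fuel with
  | 0 => none
  | fuel + 1 =>
    match PySem.List.pyGet? d (-1) with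
    | none => none                               -- dates[-1] raises IndexError
    | some dl =>
      if dl ≤ stock ∧ 0 < d.length then
        match PySem.List.pop? s (-1) with
        | none => none                           -- supplies.pop() raises IndexError
        | some (sv, s') => absorbA fuel d.dropLast s' (sv :: h) stock
      else some (d, s, h)

-- outer `while stock < k:` — every iteration performs one heappop and the heap receives at
-- most dates.length elements, so 2·dates.length + 1 fuel always suffices; a none from a
-- primitive means the Python raised (excluded by Pre_).
def loopA (fuel : Nat) (stock : Int) (d s h : List Int) (k answer : Int) : Int :=
  match fuel with
  | 0 => answer
  | fuel + 1 =>
    if stock < k then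
      match absorbA (d.length + 1) d s h stock with
      | none => answer
      | some (d', s', h') =>
        match heapPopA h' with
        | none => answer
        | some (v, h'') => loopA fuel (stock + v) d' s' h'' k (answer + 1)
    else answer

def solution (stock : Int) (dates : List Int) (supplies : List Int) (k : Int) : Int :=
  loopA (2 * dates.length + 1) stock dates.reverse supplies.reverse [] k 0

-- ===== PORT B =====
-- `j = pool.index(max(pool)); stock += pool.pop(j)`
def poolPopMaxB (pool : List Int) : Option (Int × List Int) :=
  match PySem.List.max? pool (fun y => y) with
  | none => none                                 -- max([]) raises ValueError
  | some m =>
    match PySem.List.index? pool m with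
    | none => none
    | some j =>
      match PySem.List.pop? pool (j : Int) with
      | none => none
      | some (v, rest) => some (v, rest)

-- single `while stock < k:` loop; each iteration either advances i (≤ n times) or pops the
-- pool (≤ n times), so 2·n + 1 fuel suffices; fuel 0 is unreachable.
def loopB (fuel : Nat) (stock : Int) (i : Nat) (d s pool : List Int) (k answer : Int) : Int :=
  match fuel with
  | 0 => answer
  | fuel + 1 =>
    if stock < k then
      if i < d.length ∧ d.getD i 0 ≤ stock then
        match s[i]? with
        | none => answer                         -- supplies[i] raises IndexError
        | some sv => loopB fuel stock (i + 1) d s (pool ++ [sv]) k answer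
      else
        match poolPopMaxB pool with
        | none => answer
        | some (v, pool') => loopB fuel (stock + v) i d s pool' k (answer + 1)
    else answer

def solution_alt (stock : Int) (dates : List Int) (supplies : List Int) (k : Int) : Int :=
  loopB (2 * dates.length + 1) stock 0 dates supplies [] k 0

-- ===== PRECONDITION & SPEC =====
-- Abstract greedy run with explicit raise detection: one step per absorbed date or refill
-- (never more than 2·n, so the fuel never runs out on a surviving run).  It returns true
-- exactly when Python A returns normally, false exactly where A raises.
def preRun (fuel : Nat) (stock : Int) (i : Nat) (pool d s : List Int) (k : Int) : Bool :=
  match fuel with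
  | 0 => false
  | fuel + 1 =>
    if k ≤ stock then true
    else if i < d.length then
      if d.getD i 0 ≤ stock then
        if i < s.length then preRun fuel stock (i + 1) (pool ++ [s.getD i 0]) d s k
        else false                               -- supplies exhausted: supplies.pop() raises
      else
        match pool.max? with
        | none => false                          -- empty heap: heappop(h) raises
        | some m => preRun fuel (stock + m) i (pool.erase m) d s k
    else false                                   -- dates exhausted: dates[-1] raises

-- Pre_ holds exactly on the inputs where A returns normally; it excludes ONLY the runs on
-- which A raises IndexError (dates exhausted while stock < k, heappop on an empty heap, or
-- supplies exhausted before the absorbed dates prefix) — on every input A returns on, Pre_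
-- holds and B is proved to return the same value.
def Pre_solution (stock : Int) (dates : List Int) (supplies : List Int) (k : Int) : Prop :=
  preRun (2 * dates.length + 1) stock 0 [] dates supplies k = true

instance (stock : Int) (dates : List Int) (supplies : List Int) (k : Int) :
    Decidable (Pre_solution stock dates supplies k) := by
  unfold Pre_solution; infer_instance

def pvWitness_solution : Int × List Int × List Int × Int := (1, [0, 2, 100], [2, 5, 1], 6)

def Spec_solution (stock : Int) (dates : List Int) (supplies : List Int) (k : Int) (out : Int) : Prop := out = solution_alt stock dates supplies k
instance (stock : Int) (dates : List Int) (supplies : List Int) (k : Int) (out : Int) : Decidable (Spec_solution stock dates supplies k out) := by unfold Spec_solution; infer_instance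

-- ===== CLAIM (what is proved, stated in full; the proofs are below) =====
def Claim_equal_solution : Prop := ∀ (stock : Int) (dates : List Int) (supplies : List Int) (k : Int), Dom_solution stock dates supplies k → Pre_solution stock dates supplies k → Spec_solution stock dates supplies k (solution stock dates supplies k)

-- ===== LEMMAS AND PROOFS =====

theorem heapPopA_eq_max? (h : List Int) :
    heapPopA h = match h.max? with
      | none => none
      | some m => some (m, h.erase m) := by
  cases h <;> simp [heapPopA, List.max?]

theorem max?_perm {l1 l2 : List Int} (h : l1.Perm l2) : l1.max? = l2.max? := by
  cases hm : l2.max? with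
  | none =>
    rw [List.max?_eq_none_iff] at hm ⊢
    subst hm; exact h.eq_nil
  | some m =>
    rw [List.max?_eq_some_iff] at hm ⊢
    exact ⟨h.mem_iff.mpr hm.1, fun b hb => hm.2 b (h.mem_iff.mp hb)⟩

theorem poolPopMaxB_eq (pool : List Int) : poolPopMaxB pool = heapPopA pool := by
  cases pool with
  | nil =>
    have : PySem.List.max? ([] : List Int) (fun y => y) = none :=
      (PySem.List.max?_eq_none_iff _ _).mpr rfl
    simp [poolPopMaxB, heapPopA, this]
  | cons x t =>
    simp only [poolPopMaxB, PySem.List.max?_id_cons]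
    have hmem : List.foldl max x t ∈ x :: t :=
      PySem.List.max?_mem (xs := x :: t) (key := fun y => y) (PySem.List.max?_id_cons x t)
    cases hj : PySem.List.index? (x :: t) (List.foldl max x t) with
    | none =>
      rw [PySem.List.index?_eq_none_iff] at hj
      exact absurd hmem hj
    | some j =>
      obtain ⟨hjl, hget, _⟩ := PySem.List.getElem_of_index?_eq_some hj
      dsimp only
      rw [PySem.List.pop?_natCast _ j hjl]
      have hidx : List.idxOf (List.foldl max x t) (x :: t) = j := by
        rw [List.idxOf_eq_getD_idxOf?]
        rw [PySem.List.index?_eq_idxOf?] at hj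
        rw [hj]; rfl
      simp only [heapPopA]
      rw [List.erase_eq_eraseIdx_of_idxOf hidx, hget]

-- absorbA ignores any surplus fuel: with fuel > d.length it can never hit fuel 0
theorem absorb_fuel : ∀ (f1 : Nat) (f2 : Nat) (d s h : List Int) (stock : Int),
    d.length < f1 → d.length < f2 → absorbA f1 d s h stock = absorbA f2 d s h stock := by
  intro f1
  induction f1 with
  | zero => intro f2 d s h stock h1 _; omega
  | succ f1 ih =>
    intro f2 d s h stock h1 h2
    obtain ⟨f2', rfl⟩ : ∃ m, f2 = m + 1 := ⟨f2 - 1, by omega⟩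
    simp only [absorbA]
    cases hg : PySem.List.pyGet? d (-1) with
    | none => rfl
    | some dl =>
      dsimp only
      split_ifs with hc
      · cases hp : PySem.List.pop? s (-1) with
        | none => rfl
        | some r =>
          obtain ⟨sv, s'⟩ := r
          dsimp only
          have hd : 0 < d.length := hc.2
          have : d.dropLast.length = d.length - 1 := by simp
          exact ih f2' _ _ _ _ (by omega) (by omega)
      · rfl

-- one absorption step commutes with loopA: absorbing date i first leaves the result unchanged
theorem absorb_shift (d s : List Int) (k : Int) :
    ∀ (fA : Nat) (stock : Int) (i : Nat) (h : List Int) (ans : Int),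
    (hi : i < d.length) → (hs : i < s.length) → d[i] ≤ stock →
    loopA fA stock (d.drop i).reverse (s.drop i).reverse h k ans
      = loopA fA stock (d.drop (i + 1)).reverse (s.drop (i + 1)).reverse (s[i] :: h) k ans := by
  intro fA stock i h ans hi hs hle
  cases fA with
  | zero => rfl
  | succ fA =>
    simp only [loopA]
    by_cases hk : stock < k
    · simp only [if_pos hk]
      have hdi : d.drop i = d[i] :: d.drop (i + 1) := List.drop_eq_getElem_cons hi
      have hsi : s.drop i = s[i] :: s.drop (i + 1) := List.drop_eq_getElem_cons hs
      have h1 : (d.drop i).reverse = (d.drop (i + 1)).reverse ++ [d[i]] := by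
        rw [hdi]; simp
      have h2 : (s.drop i).reverse = (s.drop (i + 1)).reverse ++ [s[i]] := by
        rw [hsi]; simp
      have hstep : absorbA ((d.drop i).reverse.length + 1) (d.drop i).reverse (s.drop i).reverse h stock
          = absorbA ((d.drop i).reverse.length) (d.drop (i + 1)).reverse (s.drop (i + 1)).reverse (s[i] :: h) stock := by
        conv_lhs => rw [h1, h2]
        simp only [absorbA, PySem.List.pyGet?_neg_one_append_singleton]
        rw [if_pos ⟨hle, by simp⟩, PySem.List.pop?_last]
        simp only [List.dropLast_concat]
        congr 1
        simp [h1]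
      have hfuel : absorbA ((d.drop i).reverse.length) (d.drop (i + 1)).reverse (s.drop (i + 1)).reverse (s[i] :: h) stock
          = absorbA ((d.drop (i + 1)).reverse.length + 1) (d.drop (i + 1)).reverse (s.drop (i + 1)).reverse (s[i] :: h) stock := by
        refine absorb_fuel _ _ _ _ _ _ ?_ ?_
        · simp only [List.length_reverse, List.length_drop]
          omega
        · simp only [List.length_reverse, List.length_drop]
          omega
      rw [hstep, hfuel]
    · simp [hk]

-- the bisimulation: a surviving abstract run equates loopA with loopB
theorem main_bisim (d s : List Int) (k : Int) :
    ∀ (f fA : Nat) (stock : Int) (i : Nat) (pool h : List Int) (ans : Int),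
    preRun f stock i pool d s k = true →
    h.Perm pool → f ≤ fA →
    loopA fA stock (d.drop i).reverse (s.drop i).reverse h k ans
      = loopB f stock i d s pool k ans := by
  intro f
  induction f with
  | zero => intro fA stock i pool h ans hpre; simp [preRun] at hpre
  | succ f ih =>
    intro fA stock i pool h ans hpre hperm hfa
    obtain ⟨fA', rfl⟩ : ∃ m, fA = m + 1 := ⟨fA - 1, by omega⟩
    simp only [preRun] at hpre
    by_cases hk : k ≤ stock
    · have hnk : ¬ stock < k := by omega
      simp [loopA, loopB, hnk]
    · rw [if_neg hk] at hpre
      have hsk : stock < k := by omega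
      by_cases hi : i < d.length
      swap
      · rw [if_neg hi] at hpre; exact absurd hpre (by simp)
      rw [if_pos hi] at hpre
      by_cases hd : d.getD i 0 ≤ stock
      · -- absorb one date
        rw [if_pos hd] at hpre
        by_cases hs : i < s.length
        swap
        · rw [if_neg hs] at hpre; exact absurd hpre (by simp)
        rw [if_pos hs] at hpre
        have hgd : d.getD i 0 = d[i] := List.getD_eq_getElem d 0 hi
        have hgs : s.getD i 0 = s[i] := List.getD_eq_getElem s 0 hs
        rw [hgs] at hpre
        -- B side takes one absorb step
        conv_rhs => rw [loopB]
        rw [if_pos hsk, if_pos ⟨hi, hd⟩, List.getElem?_eq_getElem hs]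
        dsimp only
        -- A side: commute the absorption, then apply the IH
        rw [absorb_shift d s k (fA' + 1) stock i h ans hi hs (by omega)]
        exact ih (fA' + 1) stock (i + 1) (pool ++ [s[i]]) (s[i] :: h) ans hpre
          ((hperm.cons s[i]).trans (List.perm_append_singleton s[i] pool).symm) (by omega)
      · -- refill: pop the maximum of the pool
        rw [if_neg hd] at hpre
        cases hm : pool.max? with
        | none => rw [hm] at hpre; exact absurd hpre (by simp)
        | some m =>
          rw [hm] at hpre
          have hmh : h.max? = some m := (max?_perm hperm).trans hm
          -- B side
          conv_rhs => rw [loopB]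
          rw [if_pos hsk, if_neg (by rintro ⟨_, h2⟩; exact hd h2), poolPopMaxB_eq,
            heapPopA_eq_max?, hm]
          dsimp only
          -- A side: the inner while does not fire (d[i] > stock), then heappop
          conv_lhs => rw [loopA]
          rw [if_pos hsk]
          have habs : absorbA ((d.drop i).reverse.length + 1) (d.drop i).reverse
              (s.drop i).reverse h stock
              = some ((d.drop i).reverse, (s.drop i).reverse, h) := by
            have hdi : d.drop i = d[i] :: d.drop (i + 1) := List.drop_eq_getElem_cons hi
            simp only [absorbA, PySem.List.pyGet?_neg_one, List.getLast?_reverse, hdi,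
              List.head?_cons]
            rw [if_neg (by rintro ⟨h1, _⟩; rw [List.getD_eq_getElem d 0 hi] at hd; omega)]
          rw [habs]
          dsimp only
          rw [heapPopA_eq_max?, hmh]
          dsimp only
          exact ih fA' (stock + m) i (pool.erase m) (h.erase m) (ans + 1) hpre
            (hperm.erase m) (by omega)

-- ===== VERDICT (by name: the statement is the Claim_ definition above) =====
theorem solution_spec : Claim_equal_solution := by
  unfold Claim_equal_solution Spec_solution
  intro stock dates supplies k _ hpre
  unfold Pre_solution at hpre
  have h := main_bisim dates supplies k (2 * dates.length + 1) (2 * dates.length + 1)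
    stock 0 [] [] 0 hpre (List.Perm.refl []) (le_refl _)
  simpa [solution, solution_alt] using h
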